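-- pv_equiv track=rewrite | github.com/DarksiderCrood/Python-Programming-Questions-And-Answers | Odd-Number-Of-Factors.py | count
-- ===== SOURCE A (Python) =====
-- def count (N):
--     count = 0
--     for x in range(1, N+1):
--         a = []
--         for y in range(1, x+1):
--             if x%y==0:
--                 a.append(y)
--         if len(a)%2!=0:
--             count+=1
--     return count
-- ===== SOURCE B (Python) =====
-- def count(N):
--     # Integers with an odd number of factors are exactly the perfect squares,
--     # so the answer is the integer square root of N.
--     k = 0
--     while (k + 1) * (k + 1) <= N:
--         k += 1
--     return k
-- ===== Notes on version B (the rewrite author's own statement) =====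
-- stated objective: faster
-- what changed: Replaces the quadratic divisor-listing double loop by the number-theoretic fact that exactly the perfect squares have an odd number of divisors, so B just computes the integer square root of N with a single incrementing loop.
import Mathlib
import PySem

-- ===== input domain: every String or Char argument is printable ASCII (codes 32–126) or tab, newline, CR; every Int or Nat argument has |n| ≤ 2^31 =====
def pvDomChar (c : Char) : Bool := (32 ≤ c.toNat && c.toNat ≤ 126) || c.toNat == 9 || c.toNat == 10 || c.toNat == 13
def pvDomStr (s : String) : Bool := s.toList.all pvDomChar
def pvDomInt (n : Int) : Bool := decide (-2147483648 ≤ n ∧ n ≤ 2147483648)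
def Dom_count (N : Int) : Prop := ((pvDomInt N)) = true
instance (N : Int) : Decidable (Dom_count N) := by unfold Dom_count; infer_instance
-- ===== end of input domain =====

-- B replaces A's divisor-listing double loop by a single loop computing the integer square
-- root of N (exactly the perfect squares have an odd number of divisors).

-- ===== PORT A =====
def count (N : Int) : Int :=
  (PySem.List.pyRange 1 (N+1) 1).foldl
    (fun cnt x =>
      let a : List Int := (PySem.List.pyRange 1 (x+1) 1).foldl
        (fun a y => if PySem.Int.mod x y = 0 then a ++ [y] else a) []
      if PySem.Int.mod ((a.length : Int)) 2 ≠ 0 then cnt + 1 else cnt)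
    0

-- ===== PORT B =====
-- the 'while (k+1)*(k+1) <= N: k += 1' loop of Source B
def countAltLoop (N k : Int) : Int :=
  if (k+1)*(k+1) ≤ N then countAltLoop N (k+1) else k
termination_by (N - k).toNat
decreasing_by
  rename_i h
  have hk : k < N := by nlinarith [mul_self_nonneg (k+1), mul_self_nonneg k]
  omega

def count_alt (N : Int) : Int := countAltLoop N 0

-- ===== PRECONDITION & SPEC =====
def Spec_count (N : Int) (out : Int) : Prop := out = count_alt N
instance (N : Int) (out : Int) : Decidable (Spec_count N out) := by unfold Spec_count; infer_instance

-- ===== CLAIM (what is proved, stated in full; the proofs are below) =====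
def Claim_equal_count : Prop := ∀ (N : Int), Dom_count N → Spec_count N (count N)

-- ===== LEMMAS AND PROOFS =====

-- the body of A's outer loop, named so proofs can speak about one step
def stepA (cnt x : Int) : Int :=
  if PySem.Int.mod ((((PySem.List.pyRange 1 (x+1) 1).foldl
        (fun a y => if PySem.Int.mod x y = 0 then a ++ [y] else a) ([] : List Int)).length : Int))
      2 ≠ 0
  then cnt + 1 else cnt

lemma count_eq (N : Int) : count N = (PySem.List.pyRange 1 (N+1) 1).foldl stepA 0 := rfl

-- A's inner loop collects exactly the divisors of m, so its length is #divisors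
lemma inner_len (m : ℕ) :
    (((PySem.List.pyRange 1 ((m:ℤ)+1) 1).foldl
        (fun a y => if PySem.Int.mod (m:ℤ) y = 0 then a ++ [y] else a) ([] : List Int)).length)
      = (m.divisors.card) := by
  rw [PySem.List.foldl_append_ite_eq_filter]
  simp only [List.nil_append, PySem.List.pyRange_one, List.filter_map, List.length_map,
    ← List.countP_eq_length_filter]
  have h1 : ((m:ℤ)+1-1).toNat = m := by omega
  rw [h1]
  have h2 : ∀ k : ℕ, (decide (PySem.Int.mod (m:ℤ) (1 + (k:ℤ)) = 0)) = decide ((k+1) ∣ m) := by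
    intro k
    simp only [decide_eq_decide, PySem.Int.mod_eq_zero_iff_dvd]
    constructor
    · intro h
      have : ((k+1 : ℕ) : ℤ) ∣ (m:ℤ) := by convert h using 2; push_cast; ring
      exact_mod_cast this
    · intro h
      have : ((k+1 : ℕ) : ℤ) ∣ (m:ℤ) := by exact_mod_cast h
      convert this using 2; push_cast; ring
  have h3 : (List.range m).countP ((fun x => decide (PySem.Int.mod (m:ℤ) x = 0)) ∘ (fun k : ℕ => 1 + (k:ℤ)))
      = (List.range m).countP (fun k => decide ((k+1) ∣ m)) := by
    apply List.countP_congr; intro k _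
    simp only [Function.comp]
    rw [h2 k]
  rw [h3]
  have h4 : (List.range m).countP (fun k => decide ((k+1) ∣ m))
      = ((Finset.range m).filter (fun k => (k+1) ∣ m)).card := by
    simp [Finset.filter, Finset.card, Finset.range, Multiset.filter, Multiset.range, Multiset.card,
      List.countP_eq_length_filter]
  rw [h4]
  apply Finset.card_nbij (i := fun k => k + 1)
  · intro k hk
    simp only [Finset.coe_filter, Set.mem_setOf_eq, Finset.mem_range] at hk
    exact Nat.mem_divisors.mpr ⟨hk.2, by omega⟩
  · intro a ha b hb hab
    simp only at hab; omega
  · intro d hd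
    simp only [Finset.coe_filter, Finset.mem_coe] at hd ⊢
    have hdvd := (Nat.mem_divisors.mp hd).1
    have hd1 : 1 ≤ d := Nat.pos_of_mem_divisors hd
    have hdm : d ≤ m := Nat.le_of_dvd (by have := (Nat.mem_divisors.mp hd).2; omega) hdvd
    refine ⟨d - 1, ?_, by simp only; omega⟩
    simp only [Set.mem_setOf_eq, Finset.mem_range]
    refine ⟨by omega, ?_⟩
    have : d - 1 + 1 = d := by omega
    rw [this]; exact hdvd

-- classic fact: a positive integer has an odd number of divisors iff it is a perfect square
lemma odd_card_divisors_iff (m : ℕ) (hm : m ≠ 0) :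
    Odd m.divisors.card ↔ Nat.sqrt m * Nat.sqrt m = m := by
  classical
  set lo := m.divisors.filter (fun d => d*d < m) with hlo
  set mid := m.divisors.filter (fun d => d*d = m) with hmid
  set hi := m.divisors.filter (fun d => m < d*d) with hhi
  have hsplit : m.divisors.card = lo.card + mid.card + hi.card := by
    rw [hlo, hmid, hhi]
    have h1 := Finset.card_filter_add_card_filter_not (s := m.divisors) (p := fun d => d*d < m)
    have h2 := Finset.card_filter_add_card_filter_not
      (s := m.divisors.filter (fun d => ¬ d*d < m)) (p := fun d => d*d = m)
    rw [Finset.filter_filter, Finset.filter_filter] at h2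
    have e1 : m.divisors.filter (fun d => ¬ d*d < m ∧ d*d = m) = m.divisors.filter (fun d => d*d = m) := by
      apply Finset.filter_congr; intro d _; constructor
      · rintro ⟨_, h⟩; exact h
      · intro h; exact ⟨by omega, h⟩
    have e2 : m.divisors.filter (fun d => ¬ d*d < m ∧ ¬ d*d = m) = m.divisors.filter (fun d => m < d*d) := by
      apply Finset.filter_congr; intro d _; constructor
      · rintro ⟨ha, hb⟩; omega
      · intro h; omega
    rw [e1, e2] at h2
    omega
  have hbij : lo.card = hi.card := by
    apply Finset.card_nbij (i := fun d => m / d)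
    · intro d hd
      simp only [hlo, hhi, Finset.coe_filter, Set.mem_setOf_eq, Finset.mem_coe] at hd ⊢
      obtain ⟨hdmem, hlt⟩ := hd
      obtain ⟨hdvd, _⟩ := Nat.mem_divisors.mp hdmem
      have hd0 : 0 < d := Nat.pos_of_mem_divisors hdmem
      have hq : d * (m / d) = m := Nat.mul_div_cancel' hdvd
      have hdl : d < m / d := by nlinarith
      refine ⟨Nat.mem_divisors.mpr ⟨Nat.div_dvd_of_dvd hdvd, hm⟩, by nlinarith⟩
    · intro a ha b hb hab
      simp only [hlo, Finset.coe_filter, Set.mem_setOf_eq] at ha hb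
      simp only at hab
      have ha1 : m / (m / a) = a := Nat.div_div_self (Nat.mem_divisors.mp ha.1).1 hm
      have hb1 : m / (m / b) = b := Nat.div_div_self (Nat.mem_divisors.mp hb.1).1 hm
      rw [← ha1, ← hb1, hab]
    · intro b hb
      simp only [hhi, hlo, Finset.coe_filter, Set.mem_setOf_eq, Finset.mem_coe] at hb ⊢
      obtain ⟨hbmem, hlt⟩ := hb
      obtain ⟨hbdvd, _⟩ := Nat.mem_divisors.mp hbmem
      have hb0 : 0 < b := Nat.pos_of_mem_divisors hbmem
      have hq : b * (m / b) = m := Nat.mul_div_cancel' hbdvd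
      have ha0 : 0 < m / b := Nat.div_pos (Nat.le_of_dvd (by omega) hbdvd) hb0
      have hml : m / b < b := by nlinarith
      refine ⟨m / b, ⟨Nat.mem_divisors.mpr ⟨Nat.div_dvd_of_dvd hbdvd, hm⟩, by nlinarith⟩,
        Nat.div_div_self hbdvd hm⟩
  have hmidcard : mid.card = if Nat.sqrt m * Nat.sqrt m = m then 1 else 0 := by
    split_ifs with h
    · rw [Finset.card_eq_one]
      refine ⟨Nat.sqrt m, ?_⟩
      ext d
      simp only [hmid, Finset.mem_filter, Nat.mem_divisors, Finset.mem_singleton]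
      constructor
      · rintro ⟨_, hdd⟩
        have hs : Nat.sqrt (d*d) = d := by
          have := Nat.sqrt_eq' d; simpa [pow_two] using this
        rw [← hdd, hs]
      · rintro rfl
        exact ⟨⟨⟨Nat.sqrt m, h.symm⟩, hm⟩, h⟩
    · rw [Finset.card_eq_zero]
      ext d
      simp only [hmid, Finset.mem_filter, Nat.mem_divisors, Finset.notMem_empty, iff_false]
      rintro ⟨_, hdd⟩
      have hs : Nat.sqrt (d*d) = d := by
        have := Nat.sqrt_eq' d; simpa [pow_two] using this
      rw [← hdd] at h
      rw [hs] at h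
      exact h (by omega)
  rw [hsplit, hbij, hmidcard, Nat.odd_iff]
  by_cases h : Nat.sqrt m * Nat.sqrt m = m
  · simp only [if_pos h]
    omega
  · simp only [if_neg h]
    constructor
    · intro hc; omega
    · intro hc; exact absurd hc h

-- Nat.sqrt steps by 1 exactly at perfect squares
lemma sqrt_succ (n : ℕ) :
    Nat.sqrt (n+1) = if Nat.sqrt (n+1) * Nat.sqrt (n+1) = n+1 then Nat.sqrt n + 1 else Nat.sqrt n := by
  have hmono : Nat.sqrt n ≤ Nat.sqrt (n+1) := Nat.sqrt_le_sqrt (by omega)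
  have hle : Nat.sqrt (n+1) * Nat.sqrt (n+1) ≤ n+1 := Nat.sqrt_le (n+1)
  have hlt : n < (Nat.sqrt n + 1) * (Nat.sqrt n + 1) := Nat.lt_succ_sqrt n
  split_ifs with h
  · have h1 : Nat.sqrt (n+1) ≤ Nat.sqrt n + 1 := by
      by_contra hc
      push_neg at hc
      have : (Nat.sqrt n + 1 + 1) * (Nat.sqrt n + 1 + 1) ≤ Nat.sqrt (n+1) * Nat.sqrt (n+1) :=
        Nat.mul_le_mul hc hc
      nlinarith
    have h2 : Nat.sqrt n < Nat.sqrt (n+1) := by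
      by_contra hc
      push_neg at hc
      have := Nat.sqrt_le n
      nlinarith
    omega
  · have h1 : Nat.sqrt (n+1) * Nat.sqrt (n+1) ≤ n := by omega
    have h2 : Nat.sqrt (n+1) ≤ Nat.sqrt n := Nat.le_sqrt.mpr h1
    omega

-- one step of A's outer loop adds 1 exactly on perfect squares
lemma stepA_eq (cnt : ℤ) (m : ℕ) (hm : m ≠ 0) :
    stepA cnt (m:ℤ) = cnt + (if Nat.sqrt m * Nat.sqrt m = m then 1 else 0) := by
  unfold stepA
  rw [inner_len m]
  have hcond : (PySem.Int.mod ((m.divisors.card : ℕ) : ℤ) 2 ≠ 0) ↔ Odd m.divisors.card := by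
    rw [Ne, PySem.Int.mod_eq_zero_iff_dvd]
    rw [show ((2:ℤ)) = ((2:ℕ):ℤ) by norm_num, Int.natCast_dvd_natCast]
    rw [Nat.odd_iff, Nat.two_dvd_ne_zero]
  rw [odd_card_divisors_iff m hm] at hcond
  by_cases h : Nat.sqrt m * Nat.sqrt m = m
  · rw [if_pos (hcond.mpr h), if_pos h]
  · rw [if_neg (fun hc => h (hcond.mp hc)), if_neg h]
    omega

-- A computes ⌊√n⌋ on naturals
lemma count_nat (n : ℕ) : count (n : ℤ) = (Nat.sqrt n : ℤ) := by
  induction n with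
  | zero =>
    rw [count_eq]
    norm_num [PySem.List.pyRange_one_eq_nil]
  | succ n ihn =>
    rw [count_eq]
    have hcast : ((n+1 : ℕ) : ℤ) + 1 = ((n:ℤ)+1) + 1 := by push_cast; ring
    rw [hcast, PySem.List.pyRange_one_succ_right (by omega : (1:ℤ) ≤ (n:ℤ)+1),
      List.foldl_append, List.foldl_cons, List.foldl_nil, ← count_eq, ihn]
    rw [show ((n:ℤ)+1) = ((n+1:ℕ):ℤ) by push_cast; ring, stepA_eq _ _ (by omega)]
    conv_rhs => rw [sqrt_succ n]
    split_ifs with h <;> push_cast <;> ring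

-- B's loop reaches ⌊√(N.toNat)⌋ from any admissible k
lemma countAltLoop_eq' (N : Int) : ∀ (M : ℕ) (k : Int), (N - k).toNat = M → 0 ≤ k → k*k ≤ N →
    countAltLoop N k = (Nat.sqrt N.toNat : ℤ) := by
  intro M
  induction M using Nat.strong_induction_on with
  | _ M ih =>
    intro k hM hk hkk
    rw [countAltLoop]
    split_ifs with h
    · have hkN : k < N := by nlinarith [mul_self_nonneg (k+1)]
      exact ih (N - (k+1)).toNat (by omega) (k+1) rfl (by omega) h
    · push_neg at h
      have hN : 0 ≤ N := le_trans (mul_self_nonneg k) hkk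
      set kn := k.toNat with hkn
      have hkc : (kn : ℤ) = k := Int.toNat_of_nonneg hk
      have h1 : kn * kn ≤ N.toNat := by
        have : ((kn * kn : ℕ) : ℤ) ≤ N := by push_cast [hkc]; exact hkk
        omega
      have h2 : N.toNat < (kn + 1) * (kn + 1) := by
        have : N < (((kn+1) * (kn+1) : ℕ) : ℤ) := by push_cast [hkc]; exact h
        omega
      have hle : kn ≤ Nat.sqrt N.toNat := Nat.le_sqrt.mpr h1
      have hlt : Nat.sqrt N.toNat < kn + 1 := by
        by_contra hc
        push_neg at hc
        have hsq := Nat.sqrt_le N.toNat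
        have : (kn+1)*(kn+1) ≤ Nat.sqrt N.toNat * Nat.sqrt N.toNat := Nat.mul_le_mul hc hc
        omega
      have heq : Nat.sqrt N.toNat = kn := by omega
      rw [heq, hkc]

-- ===== VERDICT (by name: the statement is the Claim_ definition above) =====
theorem count_spec : Claim_equal_count := by
  intro N _
  unfold Spec_count count_alt
  by_cases hN : 0 ≤ N
  · rw [countAltLoop_eq' N (N - 0).toNat 0 rfl le_rfl (by simpa using hN)]
    have hc : ((N.toNat : ℤ)) = N := Int.toNat_of_nonneg hN
    have h := count_nat N.toNat
    rw [hc] at h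
    exact h
  · rw [countAltLoop, if_neg (by nlinarith : ¬ (0+1)*(0+1) ≤ N)]
    rw [count_eq, PySem.List.pyRange_one_eq_nil (by omega)]
    rfl
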